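-- pv_equiv track=rewrite | github.com/cobyhausrath/esc-pos-preview-tools | python/diagnose_bytes.py | visualize_byte
-- ===== SOURCE A (Python) =====
-- def visualize_byte(byte_val):
--     """Convert a byte to visual representation (0=white, 1=black)"""
--     bits = []
--     for bit in range(8):
--         if byte_val & (1 << bit):
--             bits.append('█')  # Black
--         else:
--             bits.append('░')  # White
--     return bits
-- ===== SOURCE B (Python) =====
-- def visualize_byte(byte_val):
--     """Convert a byte to visual representation (0=white, 1=black)"""
--     return ['█' if c == '1' else '░' for c in reversed(format(byte_val & 0xFF, '08b'))]
-- ===== Notes on version B (the rewrite author's own statement) =====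
-- stated objective: idiomatic
-- what changed: B derives the glyphs from the reversed 08b-formatted binary string of the masked byte instead of looping over bit positions with per-bit shift-and-mask tests.
import Mathlib
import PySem

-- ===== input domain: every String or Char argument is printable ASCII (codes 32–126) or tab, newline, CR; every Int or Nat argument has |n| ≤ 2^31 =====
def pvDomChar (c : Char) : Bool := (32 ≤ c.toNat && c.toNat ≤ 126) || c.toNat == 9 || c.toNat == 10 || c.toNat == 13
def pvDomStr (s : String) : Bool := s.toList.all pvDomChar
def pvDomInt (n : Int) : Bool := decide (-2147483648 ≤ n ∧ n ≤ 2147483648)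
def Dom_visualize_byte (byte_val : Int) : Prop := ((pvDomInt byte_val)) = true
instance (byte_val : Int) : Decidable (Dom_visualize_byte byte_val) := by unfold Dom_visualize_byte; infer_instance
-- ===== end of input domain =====

-- B maps over the reversed '08b' binary string of the masked byte instead of looping over bit positions with shift-and-mask tests (idiomatic; same cost).

-- ===== PORT A =====
def visualize_byte (byte_val : Int) : List String :=
  (PySem.List.pyRange 0 8 1).foldl
    (fun bits bit =>
      if PySem.Int.band byte_val ((1 : Int) <<< bit.toNat) ≠ 0 then bits ++ ["█"]
      else bits ++ ["░"])
    []

-- ===== PORT B =====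
def visualize_byte_alt (byte_val : Int) : List String :=
  ((PySem.Str.zfill (PySem.Int.toBin (PySem.Int.band byte_val 255)) 8).toList.reverse).map
    (fun c => if c = '1' then "█" else "░")

-- ===== PRECONDITION & SPEC =====
def Spec_visualize_byte (byte_val : Int) (out : List String) : Prop := out = visualize_byte_alt byte_val
instance (byte_val : Int) (out : List String) : Decidable (Spec_visualize_byte byte_val out) := by unfold Spec_visualize_byte; infer_instance

-- ===== CLAIM (what is proved, stated in full; the proofs are below) =====
def Claim_equal_visualize_byte : Prop := ∀ (byte_val : Int), Dom_visualize_byte byte_val → Spec_visualize_byte byte_val (visualize_byte byte_val)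

-- ===== LEMMAS AND PROOFS =====

-- In Nat, bit i (i < 8) only depends on the value mod 256.
theorem pv_nat_and_mod (x i : Nat) (h : i < 8) : x &&& 2 ^ i = x % 256 &&& 2 ^ i := by
  rw [Nat.and_two_pow x i, Nat.and_two_pow (x % 256) i]
  have hb : (x % 256).testBit i = x.testBit i := by
    rw [show (256 : Nat) = 2 ^ 8 by norm_num, Nat.testBit_mod_two_pow]
    simp [h]
  rw [hb]

-- Python's n & 255 is n % 256.
theorem pv_band_255 (n : Int) : PySem.Int.band n 255 = n % 256 := by
  by_cases hn : 0 ≤ n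
  · rw [PySem.Int.band_of_nonneg hn (by norm_num)]
    have : n.toNat &&& (255 : Int).toNat = n.toNat % 256 := by
      rw [show ((255 : Int).toNat) = 2 ^ 8 - 1 by decide,
          Nat.and_two_pow_sub_one_eq_mod]
    rw [this]; omega
  · have h1 : ¬ (0 ≤ n) := hn
    simp only [PySem.Int.band]
    rw [if_neg h1, if_pos (by norm_num : (0:Int) ≤ 255)]
    have h255 : ((255 : Int).toNat) = 255 := by decide
    have hm : (255 : Nat) &&& (-n - 1).toNat = (-n - 1).toNat % 256 := by
      rw [Nat.and_comm, show (255 : Nat) = 2 ^ 8 - 1 by norm_num,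
          Nat.and_two_pow_sub_one_eq_mod]
    rw [h255, hm]; omega

-- Masking with a single low bit only depends on the value mod 256.
set_option maxRecDepth 100000 in
theorem pv_band_pow (n : Int) (i : Nat) (h : i < 8) :
    PySem.Int.band n ((1 : Int) <<< (i : Int)) = PySem.Int.band (n % 256) ((1 : Int) <<< (i : Int)) := by
  have hsh : (1 : Int) <<< (i : Int) = ((2 ^ i : Nat) : Int) := Int.one_shiftLeft i
  have hr0 : 0 ≤ n % 256 := Int.emod_nonneg n (by norm_num)
  have hp0 : (0 : Int) ≤ ((2 ^ i : Nat) : Int) := by positivity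
  by_cases hn : 0 ≤ n
  · rw [hsh, PySem.Int.band_of_nonneg hn hp0, PySem.Int.band_of_nonneg hr0 hp0]
    have h1 : (n % 256).toNat = n.toNat % 256 := by omega
    rw [h1, Int.toNat_natCast, ← pv_nat_and_mod n.toNat i h]
  · rw [hsh, PySem.Int.band_of_nonneg hr0 hp0, Int.toNat_natCast]
    simp only [PySem.Int.band]
    rw [if_neg hn, if_pos hp0, Int.toNat_natCast]
    set m : Nat := (-n - 1).toNat with hmdef
    have hm : (n % 256).toNat = 255 - m % 256 := by omega
    have hstep : 2 ^ i &&& m = 2 ^ i &&& m % 256 := by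
      rw [Nat.and_comm (2 ^ i) m, Nat.and_comm (2 ^ i) (m % 256), ← pv_nat_and_mod m i h]
    have key : ∀ y : Fin 256, ∀ j : Fin 8,
        2 ^ j.val - (2 ^ j.val &&& y.val) = (255 - y.val) &&& 2 ^ j.val := by decide
    have := key ⟨m % 256, Nat.mod_lt m (by norm_num)⟩ ⟨i, h⟩
    simp only at this
    rw [hm, hstep, this]

-- A only looks at the low 8 bits.
theorem pv_A_mod (n : Int) : visualize_byte n = visualize_byte (n % 256) := by
  unfold visualize_byte
  rw [show PySem.List.pyRange 0 8 1 = [0, 1, 2, 3, 4, 5, 6, 7] from by decide]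
  simp only [List.foldl,
      show ((0 : Int).toNat) = 0 from rfl, show ((1 : Int).toNat) = 1 from rfl,
      show ((2 : Int).toNat) = 2 from rfl, show ((3 : Int).toNat) = 3 from rfl,
      show ((4 : Int).toNat) = 4 from rfl, show ((5 : Int).toNat) = 5 from rfl,
      show ((6 : Int).toNat) = 6 from rfl, show ((7 : Int).toNat) = 7 from rfl,
      pv_band_pow n 0 (by norm_num), pv_band_pow n 1 (by norm_num),
      pv_band_pow n 2 (by norm_num), pv_band_pow n 3 (by norm_num),
      pv_band_pow n 4 (by norm_num), pv_band_pow n 5 (by norm_num),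
      pv_band_pow n 6 (by norm_num), pv_band_pow n 7 (by norm_num)]

-- B only looks at the low 8 bits.
theorem pv_B_mod (n : Int) : visualize_byte_alt n = visualize_byte_alt (n % 256) := by
  unfold visualize_byte_alt
  rw [pv_band_255 n, pv_band_255 (n % 256), Int.emod_emod_of_dvd n dvd_rfl]

-- A = B on every residue 0..255 (finite check).
set_option maxRecDepth 100000 in
theorem pv_core : ∀ k : Fin 256,
    visualize_byte (k.val : Int) = visualize_byte_alt (k.val : Int) := by decide

-- ===== VERDICT (by name: the statement is the Claim_ definition above) =====
theorem visualize_byte_spec : Claim_equal_visualize_byte := by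
  intro n _
  unfold Spec_visualize_byte
  rw [pv_A_mod n, pv_B_mod n]
  have hr0 : 0 ≤ n % 256 := Int.emod_nonneg n (by norm_num)
  have hr1 : n % 256 < 256 := Int.emod_lt_of_pos n (by norm_num)
  have hk : (n % 256) = (((n % 256).toNat : Nat) : Int) := by omega
  rw [hk]
  exact pv_core ⟨(n % 256).toNat, by omega⟩
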